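-- pv_equiv track=rewrite | github.com/jb-23/meterdraw | writepng.py | pass_image
-- ===== SOURCE A (Python) =====
-- def pass_image(width, planes):
--     lines = int(len(planes[0]) / width)
--     blob = []
--     for i in range(0, lines):
--         scanline = get_scanline(i, width, planes)
--         filtered = filter_0(scanline)
--         blob += filtered
--     return blob
--
-- def get_scanline(line_number, width, planes):
--     start = line_number * width
--     scanline = []
--     for i in range(start, start+width):
--         for p in planes:
--             scanline.append(p[i])
--     return scanline
--
-- def filter_0(scanline):
--     return [0] + scanline
-- ===== SOURCE B (Python) =====
-- def pass_image(width, planes):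
--     lines = int(len(planes[0]) / width)
--     row = width * len(planes)
--     flat = [v for group in zip(*planes) for v in group][:lines * row]
--     return [b for j in range(lines) for b in [0] + flat[j * row:(j + 1) * row]]
-- ===== Notes on version B (the rewrite author's own statement) =====
-- stated objective: simpler
-- what changed: Replaced the per-line/per-pixel positional indexing (three helper functions, p[i] lookups) by a transposed traversal: zip(*planes) interleaves the planes column-major, the stream is truncated to lines*width pixels and re-chunked into scanlines by slicing, each prefixed with the filter byte 0.
import Mathlib
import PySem

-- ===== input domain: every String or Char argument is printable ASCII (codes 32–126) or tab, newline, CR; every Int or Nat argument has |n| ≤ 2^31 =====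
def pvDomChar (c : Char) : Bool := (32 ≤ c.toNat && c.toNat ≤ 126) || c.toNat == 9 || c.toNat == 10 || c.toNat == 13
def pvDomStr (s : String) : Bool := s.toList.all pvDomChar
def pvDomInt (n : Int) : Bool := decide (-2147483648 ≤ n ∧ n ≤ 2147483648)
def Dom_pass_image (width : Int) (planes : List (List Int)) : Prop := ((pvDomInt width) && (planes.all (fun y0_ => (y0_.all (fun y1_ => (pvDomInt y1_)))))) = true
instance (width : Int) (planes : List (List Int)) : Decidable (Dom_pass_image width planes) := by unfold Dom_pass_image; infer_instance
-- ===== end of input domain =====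

-- B interleaves the planes with zip(*planes) and re-chunks the pixel stream into scanlines by
-- slicing, instead of A's per-line/per-pixel positional indexing through three helpers (simpler).

-- ===== PORT A =====
def get_scanline (line_number : Int) (width : Int) (planes : List (List Int)) : List Int :=
  let start := line_number * width
  (PySem.List.pyRange start (start + width) 1).foldl
    (fun scanline i =>
      planes.foldl (fun scanline p => scanline ++ [PySem.List.pyGetD p i 0]) scanline) []

def filter_0 (scanline : List Int) : List Int := [0] ++ scanline

def pass_image (width : Int) (planes : List (List Int)) : List Int :=
  let lines := PySem.Int.truncdiv ((PySem.List.pyGetD planes 0 []).length : Int) width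
  (PySem.List.pyRange 0 lines 1).foldl
    (fun blob i => blob ++ filter_0 (get_scanline i width planes)) []

-- ===== PORT B =====
-- zip(*planes): the list of columns, truncated to the shortest plane (Python's zip)
def zipStar (ls : List (List Int)) : List (List Int) :=
  match ls with
  | [] => []
  | [p] => p.map (fun x => [x])
  | p :: rest => (p.zip (zipStar rest)).map (fun g => g.1 :: g.2)

def pass_image_alt (width : Int) (planes : List (List Int)) : List Int :=
  let lines := PySem.Int.truncdiv ((PySem.List.pyGetD planes 0 []).length : Int) width
  let row := width * (planes.length : Int)
  let flat := PySem.List.slice ((zipStar planes).flatMap (fun g => g)) none (some (lines * row))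
  (PySem.List.pyRange 0 lines 1).flatMap
    (fun j => [0] ++ PySem.List.slice flat (some (j * row)) (some ((j + 1) * row)))

-- ===== PRECONDITION & SPEC =====
-- Pre_ = exactly the inputs on which A returns: planes nonempty (else IndexError on planes[0]),
-- width ≠ 0 (else ZeroDivisionError), and for positive width every plane long enough for all
-- lines*width pixel accesses (else IndexError on p[i]); for width < 0, A accesses nothing and returns [].
def Pre_pass_image (width : Int) (planes : List (List Int)) : Prop :=
  planes ≠ [] ∧ width ≠ 0 ∧
  (0 < width → ∀ p ∈ planes,
    PySem.Int.truncdiv (planes.headI.length : Int) width * width ≤ (p.length : Int))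
instance (width : Int) (planes : List (List Int)) : Decidable (Pre_pass_image width planes) := by
  unfold Pre_pass_image; infer_instance

def pvWitness_pass_image : Int × List (List Int) := (2, [[1, 2, 3, 4], [5, 6, 7, 8]])

def Spec_pass_image (width : Int) (planes : List (List Int)) (out : List Int) : Prop := out = pass_image_alt width planes
instance (width : Int) (planes : List (List Int)) (out : List Int) : Decidable (Spec_pass_image width planes out) := by unfold Spec_pass_image; infer_instance

-- ===== CLAIM (what is proved, stated in full; the proofs are below) =====
def Claim_equal_pass_image : Prop := ∀ (width : Int) (planes : List (List Int)), Dom_pass_image width planes → Pre_pass_image width planes → Spec_pass_image width planes (pass_image width planes)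

-- ===== LEMMAS AND PROOFS =====

-- the common column: every plane's pixel at index j
def col (planes : List (List Int)) (j : Nat) : List Int :=
  planes.map (fun p => p.getD j 0)

theorem zipStar_cons_of_nonempty (L : List (List Int)) (hL : L ≠ [])
    (h : ∀ p ∈ L, p ≠ []) :
    zipStar L = (L.map (fun p => p.headI)) :: zipStar (L.map (fun p => p.tail)) := by
  induction L with
  | nil => exact absurd rfl hL
  | cons p rest ih =>
    cases rest with
    | nil =>
      obtain ⟨x, t, rfl⟩ := List.exists_cons_of_ne_nil (h p (by simp))
      cases t <;> simp [zipStar]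
    | cons q rs =>
      obtain ⟨x, t, rfl⟩ := List.exists_cons_of_ne_nil (h p (List.mem_cons_self ..))
      have ih' := ih (by simp) (fun u hu => h u (List.mem_cons_of_mem _ hu))
      simp only [zipStar, ih']
      cases rs <;> simp [zipStar]

theorem zipStar_take (m : Nat) (L : List (List Int)) (hL : L ≠ [])
    (h : ∀ p ∈ L, m ≤ p.length) :
    (zipStar L).take m = (List.range m).map (col L) := by
  induction m generalizing L with
  | zero => simp
  | succ m ih =>
    have hne : ∀ p ∈ L, p ≠ [] := by
      intro p hp e
      have := h p hp; rw [e] at this; simp at this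
    rw [zipStar_cons_of_nonempty L hL hne, List.take_succ_cons,
      ih (L.map (fun p => p.tail)) (by simpa using hL)
        (by intro q hq
            obtain ⟨p, hp, rfl⟩ := List.mem_map.mp hq
            have hlen := h p hp
            cases p with
            | nil => exact absurd rfl (hne _ hp)
            | cons a t => simp at hlen ⊢; omega),
      List.range_succ_eq_map]
    simp only [List.map_cons, List.map_map]
    congr 1
    · apply List.map_congr_left
      intro p hp
      obtain ⟨a, t, rfl⟩ := List.exists_cons_of_ne_nil (hne p hp)
      simp
    · apply List.map_congr_left
      intro j hj
      unfold col
      simp only [Function.comp, List.map_map]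
      apply List.map_congr_left
      intro p hp
      obtain ⟨a, t, rfl⟩ := List.exists_cons_of_ne_nil (hne p hp)
      simp

theorem flatten_take_mul (b : Nat) (rows : List (List Int)) (c : Nat)
    (h : ∀ r ∈ rows.take b, r.length = c) :
    rows.flatten.take (b * c) = (rows.take b).flatten := by
  induction b generalizing rows with
  | zero => simp
  | succ b ih =>
    cases rows with
    | nil => simp
    | cons r rest =>
      have hr : r.length = c := h r (by simp)
      have e : (b + 1) * c = r.length + b * c := by rw [hr]; ring
      rw [List.flatten_cons, List.take_succ_cons, e, List.take_append,
        List.take_of_length_le (by omega), Nat.add_sub_cancel_left, ih rest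
        (fun q hq => h q (by simp [List.take_succ_cons]; right; exact hq))]
      simp

theorem flatten_drop_mul (a : Nat) (rows : List (List Int)) (c : Nat)
    (h : ∀ r ∈ rows.take a, r.length = c) :
    rows.flatten.drop (a * c) = (rows.drop a).flatten := by
  induction a generalizing rows with
  | zero => simp
  | succ a ih =>
    cases rows with
    | nil => simp
    | cons r rest =>
      have hr : r.length = c := h r (by simp)
      have e : (a + 1) * c = r.length + a * c := by rw [hr]; ring
      rw [List.flatten_cons, List.drop_succ_cons, e, List.drop_append,
        List.drop_of_length_le (by omega), Nat.add_sub_cancel_left, ih rest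
        (fun q hq => h q (by simp [List.take_succ_cons]; right; exact hq))]
      simp

theorem tdiv_natCast (n k : Nat) : PySem.Int.truncdiv (n : Int) (k : Int) = ((n / k : Nat) : Int) := rfl

theorem A_norm (wn : Nat) (L : List (List Int)) :
    pass_image (wn : Int) L =
      (List.range ((PySem.List.pyGetD L 0 []).length / wn)).flatMap
        (fun j => 0 :: (List.range' (j * wn) wn).flatMap (col L)) := by
  unfold pass_image filter_0 get_scanline
  simp only [PySem.List.foldl_append_singleton_eq_map, PySem.List.foldl_append_eq_flatMap,
    List.nil_append, tdiv_natCast, PySem.List.pyRange_zero_natCast, List.flatMap_map]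
  congr 1
  funext a
  rw [PySem.List.pyRange_one]
  have e1 : ((a:Int) * wn + wn - a * wn).toNat = wn := by omega
  rw [e1, List.range'_eq_map_range]
  simp only [List.flatMap_map, List.cons_append, List.nil_append]
  rw [List.flatMap_def, List.flatMap_def]
  refine congrArg (fun t => 0 :: List.flatten t) ?_
  apply List.map_congr_left
  intro k _
  have e2 : ((a:Int) * wn + k) = ((a * wn + k : Nat) : Int) := by push_cast; ring
  simp only [e2, PySem.List.pyGetD_natCast, col]

theorem range_drop_take (a b N : Nat) (h : a + b ≤ N) :
    ((List.range N).drop a).take b = List.range' a b := by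
  apply List.ext_getElem
  · simp; try omega
  · intro i h1 h2
    simp [List.getElem_drop, List.getElem_range, List.getElem_range']
    try omega

theorem B_norm (wn : Nat) (L : List (List Int)) (hL : L ≠ [])
    (hlen : ∀ p ∈ L, ((PySem.List.pyGetD L 0 []).length / wn) * wn ≤ p.length) :
    pass_image_alt (wn : Int) L =
      (List.range ((PySem.List.pyGetD L 0 []).length / wn)).flatMap
        (fun j => 0 :: (List.range' (j * wn) wn).flatMap (col L)) := by
  set m := (PySem.List.pyGetD L 0 []).length / wn with hm
  set k := L.length with hk
  have hrows : (zipStar L).take (m * wn) = (List.range (m * wn)).map (col L) :=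
    zipStar_take (m * wn) L hL (fun p hp => hlen p hp)
  have hcol_len : ∀ r ∈ (List.range (m * wn)).map (col L), r.length = k := by
    intro r hr
    obtain ⟨j, _, rfl⟩ := List.mem_map.mp hr
    simp [col, hk]
  unfold pass_image_alt
  simp only [tdiv_natCast, ← hm, ← hk]
  have e1 : ((m : Int) * ((wn : Int) * (k : Int))) = ((m * (wn * k) : Nat) : Int) := by push_cast; ring
  rw [e1, PySem.List.slice_to_natCast]
  have eflat : ((zipStar L).flatMap (fun g => g)).take (m * (wn * k))
      = ((List.range (m * wn)).map (col L)).flatten := by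
    have : (zipStar L).flatMap (fun g => g) = (zipStar L).flatten := by
      simp [List.flatMap_def]
    rw [this, ← Nat.mul_assoc, flatten_take_mul (m * wn) _ k (by rw [hrows]; exact hcol_len), hrows]
  rw [eflat, PySem.List.pyRange_zero_natCast, List.flatMap_map, List.flatMap_def, List.flatMap_def]
  refine congrArg List.flatten ?_
  apply List.map_congr_left
  intro j hj
  have hjm : j < m := List.mem_range.mp hj
  have e3 : ((j : Int) * ((wn : Int) * (k : Int))) = ((j * (wn * k) : Nat) : Int) := by push_cast; ring
  have e4 : (((j : Int) + 1) * ((wn : Int) * (k : Int))) = (((j + 1) * (wn * k) : Nat) : Int) := by push_cast; ring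
  rw [e3, e4, PySem.List.slice_natCast]
  have e5 : (j + 1) * (wn * k) - j * (wn * k) = wn * k := by
    rw [Nat.succ_mul, Nat.add_sub_cancel_left]
  rw [e5, ← Nat.mul_assoc,
    flatten_drop_mul (j * wn) _ k (fun r hr => hcol_len r (List.mem_of_mem_take hr)),
    flatten_take_mul wn _ k (fun r hr => hcol_len r (List.mem_of_mem_drop (List.mem_of_mem_take hr))),
    ← List.map_drop, ← List.map_take, range_drop_take (j * wn) wn (m * wn) (by
      have : (j + 1) * wn ≤ m * wn := Nat.mul_le_mul_right wn hjm
      rw [Nat.succ_mul] at this; omega)]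
  simp [List.flatMap_def]

theorem tdiv_nonpos_of_nonneg_of_neg (a b : Int) (ha : 0 ≤ a) (hb : b < 0) : a.tdiv b ≤ 0 := by
  have := Int.tdiv_nonneg (b := -b) ha (by omega)
  rw [Int.tdiv_neg] at this
  omega

theorem main_eq (w : Int) (L : List (List Int)) (hL : L ≠ []) (hw0 : w ≠ 0)
    (hlen : 0 < w → ∀ p ∈ L,
      PySem.Int.truncdiv (L.headI.length : Int) w * w ≤ (p.length : Int)) :
    pass_image w L = pass_image_alt w L := by
  have hget : PySem.List.pyGetD L 0 [] = L.headI := by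
    cases L
    · rfl
    · simp [PySem.List.pyGetD_zero]
  rcases lt_trichotomy w 0 with hw | hw | hw
  · have hlines : PySem.Int.truncdiv ((PySem.List.pyGetD L 0 []).length : Int) w ≤ 0 :=
      tdiv_nonpos_of_nonneg_of_neg _ _ (by positivity) hw
    unfold pass_image pass_image_alt
    simp [PySem.List.pyRange_one_eq_nil hlines]
  · exact absurd hw hw0
  · obtain ⟨wn, rfl⟩ : ∃ wn : Nat, w = (wn : Int) := ⟨w.toNat, (Int.toNat_of_nonneg hw.le).symm⟩
    have hlen' : ∀ p ∈ L, ((PySem.List.pyGetD L 0 []).length / wn) * wn ≤ p.length := by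
      intro p hp
      have h2 := hlen hw p hp
      rw [← hget] at h2
      rw [show PySem.Int.truncdiv ((PySem.List.pyGetD L 0 []).length : Int) (wn : Int)
            = (((PySem.List.pyGetD L 0 []).length / wn : Nat) : Int) from tdiv_natCast _ _] at h2
      exact_mod_cast h2
    rw [A_norm, B_norm wn L hL hlen']

-- ===== VERDICT (by name: the statement is the Claim_ definition above) =====
theorem pass_image_spec : Claim_equal_pass_image := by
  intro w L _ hpre
  show pass_image w L = pass_image_alt w L
  exact main_eq w L hpre.1 hpre.2.1 hpre.2.2
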